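-- pv_equiv track=rewrite | github.com/jw426/leetcode | q30-34/q30_substring.py | reduceWordDct
-- ===== SOURCE A (Python) =====
-- def reduceWordDct(dct, idx):
--
--     kv_pair = list(dct.items()).copy()
--     for k, v in kv_pair:
--         j = 0
--         while (j < len(v) and v[j] < idx):
--             j += 1
--
--         # reduced idx array
--         dct[k] = v[j:]
--
--         if dct[k] and dct[k][0] == idx:
--             return k
--
--     return None
-- ===== SOURCE B (Python) =====
-- def reduceWordDct(dct, idx):
--     # Return-value equivalent to A: returns the first key whose first element
--     # that is >= idx equals idx exactly.  Unlike A it does not slice or mutate dct.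
--     for k, v in dct.items():
--         if next((x for x in v if x >= idx), None) == idx:
--             return k
--     return None
-- ===== Notes on version B (the rewrite author's own statement) =====
-- stated objective: simpler
-- what changed: B drops A's index-counting while loop, list slicing and in-place dict rewrites: per key it just takes the first element >= idx with a generator and compares it to idx, returning the value only (no mutation of dct).
import Mathlib
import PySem

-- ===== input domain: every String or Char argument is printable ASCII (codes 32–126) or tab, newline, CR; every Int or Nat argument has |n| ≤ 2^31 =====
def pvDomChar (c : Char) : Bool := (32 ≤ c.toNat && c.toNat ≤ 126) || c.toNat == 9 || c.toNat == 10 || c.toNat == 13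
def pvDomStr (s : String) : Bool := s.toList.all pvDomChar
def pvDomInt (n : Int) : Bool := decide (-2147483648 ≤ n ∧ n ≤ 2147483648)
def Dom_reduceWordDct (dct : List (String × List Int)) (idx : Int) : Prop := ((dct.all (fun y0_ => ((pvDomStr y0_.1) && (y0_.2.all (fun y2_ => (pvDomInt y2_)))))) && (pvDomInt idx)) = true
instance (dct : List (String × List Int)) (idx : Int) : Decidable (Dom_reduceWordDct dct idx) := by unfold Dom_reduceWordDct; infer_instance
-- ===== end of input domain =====

-- NOTE: A mutates dct in place (trims the value lists of the keys it visits); the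
-- equivalence proved here is about the RETURN value only, and B performs no mutation.

-- ===== PORT A =====
-- the while loop: j starts at 0 and advances while j < len(v) and v[j] < idx
def pvCountLt (v : List Int) (idx : Int) : Nat :=
  match v with
  | [] => 0
  | x :: xs => if x < idx then pvCountLt xs idx + 1 else 0

def reduceWordDct (dct : List (String × List Int)) (idx : Int) : Option String :=
  match dct with
  | [] => none
  | (k, v) :: rest =>
    let j := pvCountLt v idx
    -- dct[k] = v[j:], then 'if dct[k] and dct[k][0] == idx'; reading dct[k] right
    -- after the assignment yields exactly v[j:] (keys of a Python dict are distinct,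
    -- Pre_); v[j:] with 0 ≤ j is List.drop j v
    match v.drop j with
    | [] => reduceWordDct rest idx
    | x :: _ => if x = idx then some k else reduceWordDct rest idx

-- ===== PORT B =====
-- next((x for x in v if x >= idx), None)
def pvFirstGe (v : List Int) (idx : Int) : Option Int := v.find? (fun x => idx ≤ x)

def reduceWordDct_alt (dct : List (String × List Int)) (idx : Int) : Option String :=
  match dct with
  | [] => none
  | (k, v) :: rest =>
    if pvFirstGe v idx = some idx then some k else reduceWordDct_alt rest idx

-- ===== PRECONDITION & SPEC =====
-- Pre_ requires pairwise-distinct keys: a Python dict cannot hold duplicate keys, so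
-- the association-list encoding only represents an actual input of A when keys are
-- distinct (no Python-expressible input is excluded).
def Pre_reduceWordDct (dct : List (String × List Int)) (idx : Int) : Prop :=
  dct.Pairwise (fun p q => p.1 ≠ q.1)
instance (dct : List (String × List Int)) (idx : Int) : Decidable (Pre_reduceWordDct dct idx) := by unfold Pre_reduceWordDct; infer_instance

def pvWitness_reduceWordDct : (List (String × List Int)) × Int := ([("aa", [1, 3]), ("b", [2])], 3)

def Spec_reduceWordDct (dct : List (String × List Int)) (idx : Int) (out : Option String) : Prop := out = reduceWordDct_alt dct idx
instance (dct : List (String × List Int)) (idx : Int) (out : Option String) : Decidable (Spec_reduceWordDct dct idx out) := by unfold Spec_reduceWordDct; infer_instance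

-- ===== CLAIM (what is proved, stated in full; the proofs are below) =====
def Claim_equal_reduceWordDct : Prop := ∀ (dct : List (String × List Int)) (idx : Int), Dom_reduceWordDct dct idx → Pre_reduceWordDct dct idx → Spec_reduceWordDct dct idx (reduceWordDct dct idx)

-- ===== LEMMAS AND PROOFS =====

-- the first element surviving A's trim is exactly B's first element ≥ idx
theorem head?_drop_countLt (v : List Int) (idx : Int) :
    (v.drop (pvCountLt v idx)).head? = pvFirstGe v idx := by
  induction v with
  | nil => rfl
  | cons x xs ih =>
    by_cases h : x < idx
    · have hge : ¬ (idx ≤ x) := by omega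
      simp [pvCountLt, pvFirstGe, h, hge, List.find?] at *
      simpa [pvFirstGe] using ih
    · have hge : idx ≤ x := by omega
      simp [pvCountLt, pvFirstGe, h, hge, List.find?]

theorem reduceWordDct_eq_alt (dct : List (String × List Int)) (idx : Int) :
    reduceWordDct dct idx = reduceWordDct_alt dct idx := by
  induction dct with
  | nil => rfl
  | cons p rest ih =>
    obtain ⟨k, v⟩ := p
    have h := head?_drop_countLt v idx
    simp only [reduceWordDct, reduceWordDct_alt]
    cases hd : v.drop (pvCountLt v idx) with
    | nil =>
      rw [hd] at h
      simp only [List.head?] at h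
      rw [← h]
      simp [ih]
    | cons x xs =>
      rw [hd] at h
      simp only [List.head?] at h
      rw [← h]
      by_cases hx : x = idx <;> simp [hx, ih]

-- ===== VERDICT (by name: the statement is the Claim_ definition above) =====
theorem reduceWordDct_spec : Claim_equal_reduceWordDct := by
  intro dct idx _ _
  exact reduceWordDct_eq_alt dct idx
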